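-- pv_equiv track=rewrite | github.com/programehr/Projan | trojanzoo/utils/analyze.py | analyze_detections
-- ===== SOURCE A (Python) =====
-- def analyze_detections(arrays, target):
--     histo = {detection: 0 for detection in ['d', 'dfp', 'nd', 'wd']}
--     # detected,
--     # detected w/ false positive,
--     # not detected,
--     # wrong detection.
--     for x in arrays:
--         if target in x:
--             if len(x) == 1:
--                 histo['d'] += 1
--             else:
--                 histo['dfp'] += 1
--         elif len(x) == 0:
--             histo['nd'] += 1
--         else:
--             histo['wd'] += 1
--     return histo
-- ===== SOURCE B (Python) =====
-- def analyze_detections(arrays, target):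
--     # 'd' arrays are exactly the literal [target]; 'nd' arrays are exactly [];
--     # everything else follows by arithmetic from the total and the hit count.
--     n = len(arrays)
--     d = arrays.count([target])
--     nd = arrays.count([])
--     hits = sum(target in x for x in arrays)
--     return {'d': d, 'dfp': hits - d, 'nd': nd, 'wd': n - hits - nd}
-- ===== Notes on version B (the rewrite author's own statement) =====
-- stated objective: alternative
-- what changed: Replaces A's per-element 4-way branch classification with two equality counts of the literal values [target] and [] plus a single hit tally, deriving dfp and wd by arithmetic complement (dfp = hits-d, wd = n-hits-nd).
import Mathlib
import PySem

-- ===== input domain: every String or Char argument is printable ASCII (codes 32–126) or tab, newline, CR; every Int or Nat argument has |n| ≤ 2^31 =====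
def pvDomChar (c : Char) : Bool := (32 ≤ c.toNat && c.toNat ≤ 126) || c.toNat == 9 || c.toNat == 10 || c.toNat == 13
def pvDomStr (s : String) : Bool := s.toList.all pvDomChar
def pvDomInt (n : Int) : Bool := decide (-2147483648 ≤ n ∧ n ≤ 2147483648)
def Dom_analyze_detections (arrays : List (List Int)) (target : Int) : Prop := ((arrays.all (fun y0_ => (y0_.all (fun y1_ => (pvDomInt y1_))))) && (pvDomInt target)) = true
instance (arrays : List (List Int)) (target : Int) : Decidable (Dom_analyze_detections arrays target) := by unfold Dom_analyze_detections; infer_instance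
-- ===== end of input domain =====

-- B replaces A's per-element 4-way branch classification with two equality counts
-- ([target] and []) plus one hit tally and arithmetic complements ('alternative', same O(n) cost).

-- ===== PORT A =====
-- single pass: for each x, branch on membership/length and bump the matching key
def analyze_detections (arrays : List (List Int)) (target : Int) : List (String × Int) :=
  let histo : PySem.Dict String Int :=
    (["d", "dfp", "nd", "wd"].foldl (fun d k => d.insert k 0) PySem.Dict.empty)
  (arrays.foldl (fun h x =>
      if x.contains target then
        if x.length = 1 then h.modify "d" 0 (· + 1)
        else h.modify "dfp" 0 (· + 1)
      else if x.length = 0 then h.modify "nd" 0 (· + 1)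
      else h.modify "wd" 0 (· + 1)) histo).items

-- ===== PORT B =====
-- n = len(arrays); d = arrays.count([target]); nd = arrays.count([]);
-- hits = sum(target in x for x in arrays); the rest by arithmetic complement
def analyze_detections_alt (arrays : List (List Int)) (target : Int) : List (String × Int) :=
  let n : Int := arrays.length
  let d : Int := arrays.count [target]
  let nd : Int := arrays.count ([] : List Int)
  let hits : Int := arrays.foldl (fun acc x => acc + (if x.contains target then 1 else 0)) 0
  [("d", d), ("dfp", hits - d), ("nd", nd), ("wd", n - hits - nd)]

-- ===== PRECONDITION & SPEC =====
def Spec_analyze_detections (arrays : List (List Int)) (target : Int) (out : List (String × Int)) : Prop := out = analyze_detections_alt arrays target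
instance (arrays : List (List Int)) (target : Int) (out : List (String × Int)) : Decidable (Spec_analyze_detections arrays target out) := by unfold Spec_analyze_detections; infer_instance

-- ===== CLAIM (what is proved, stated in full; the proofs are below) =====
def Claim_equal_analyze_detections : Prop := ∀ (arrays : List (List Int)) (target : Int), Dom_analyze_detections arrays target → Spec_analyze_detections arrays target (analyze_detections arrays target)

-- ===== LEMMAS AND PROOFS =====

-- evaluation of A's histogram updates on the concrete 4-key dict
lemma mod_d (a b c d : Int) :
    (PySem.Dict.mk [("d",a),("dfp",b),("nd",c),("wd",d)]).modify "d" 0 (· + 1)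
    = PySem.Dict.mk [("d",a+1),("dfp",b),("nd",c),("wd",d)] := rfl
lemma mod_dfp (a b c d : Int) :
    (PySem.Dict.mk [("d",a),("dfp",b),("nd",c),("wd",d)]).modify "dfp" 0 (· + 1)
    = PySem.Dict.mk [("d",a),("dfp",b+1),("nd",c),("wd",d)] := rfl
lemma mod_nd (a b c d : Int) :
    (PySem.Dict.mk [("d",a),("dfp",b),("nd",c),("wd",d)]).modify "nd" 0 (· + 1)
    = PySem.Dict.mk [("d",a),("dfp",b),("nd",c+1),("wd",d)] := rfl
lemma mod_wd (a b c d : Int) :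
    (PySem.Dict.mk [("d",a),("dfp",b),("nd",c),("wd",d)]).modify "wd" 0 (· + 1)
    = PySem.Dict.mk [("d",a),("dfp",b),("nd",c),("wd",d+1)] := rfl

-- a singleton containing target is exactly the literal [target]
lemma d_char (target : Int) (x : List Int) (hm : target ∈ x) (hl : x.length = 1) :
    x = [target] := by
  cases x with
  | nil => simp at hm
  | cons a t =>
    cases t with
    | nil => simp at hm; simp [hm]
    | cons b s => simp at hl

-- A's loop, started from any 4-key histogram, adds B's four quantities
lemma loop_invariant (target : Int) (arrays : List (List Int)) :
    ∀ (a b c d : Int),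
      (arrays.foldl (fun h x =>
        if x.contains target then
          if x.length = 1 then h.modify "d" 0 (· + 1)
          else h.modify "dfp" 0 (· + 1)
        else if x.length = 0 then h.modify "nd" 0 (· + 1)
        else h.modify "wd" 0 (· + 1))
        (PySem.Dict.mk [("d", a), ("dfp", b), ("nd", c), ("wd", d)])).items
      = [("d",   a + (arrays.count [target] : Int)),
         ("dfp", b + ((arrays.countP (fun x => decide (target ∈ x)) : Int) - arrays.count [target])),
         ("nd",  c + (arrays.count ([] : List Int) : Int)),
         ("wd",  d + ((arrays.length : Int) - (arrays.countP (fun x => decide (target ∈ x)) : Int)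
                       - arrays.count ([] : List Int)))] := by
  induction arrays with
  | nil =>
    intro a b c d
    simp
  | cons x xs ih =>
    intro a b c d
    simp only [List.foldl_cons]
    by_cases hmem : x.contains target
    · have hm : target ∈ x := by simpa using hmem
      by_cases hlen : x.length = 1
      · have hx : x = [target] := d_char target x hm hlen
        rw [if_pos hmem, if_pos hlen, mod_d, ih]
        have hne : x ≠ ([] : List Int) := by simp [hx]
        simp [hx]
        omega
      · have hxne : x ≠ [target] := by
          intro h; exact hlen (by simp [h])
        have hne : x ≠ ([] : List Int) := by
          intro h; rw [h] at hm; simp at hm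
        rw [if_pos hmem, if_neg hlen, mod_dfp, ih]
        simp [hm, hxne, hne]
        omega
    · have hm : target ∉ x := by simpa using hmem
      have hxne : x ≠ [target] := by
        intro h; rw [h] at hm; simp at hm
      by_cases hlen : x.length = 0
      · have hx : x = ([] : List Int) := List.length_eq_zero_iff.1 hlen
        rw [if_neg hmem, if_pos hlen, mod_nd, ih]
        simp [hx]
        omega
      · have hne : x ≠ ([] : List Int) := by
          intro h; exact hlen (by simp [h])
        rw [if_neg hmem, if_neg hlen, mod_wd, ih]
        simp [hm, hxne, hne]
        omega

-- B's running hit tally is the countP of membership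
lemma hits_eq (target : Int) (arrays : List (List Int)) : ∀ (a : Int),
    arrays.foldl (fun acc x => acc + (if x.contains target then 1 else 0)) a
    = a + (arrays.countP (fun x => decide (target ∈ x)) : Int) := by
  induction arrays with
  | nil => intro a; simp
  | cons x xs ih =>
    intro a
    simp only [List.foldl_cons]
    rw [ih]
    by_cases hm : target ∈ x
    · simp [hm]
      omega
    · simp [hm]

-- ===== VERDICT (by name: the statement is the Claim_ definition above) =====
theorem analyze_detections_spec : Claim_equal_analyze_detections := by
  intro arrays target _
  unfold Spec_analyze_detections analyze_detections
  have hinit : (["d", "dfp", "nd", "wd"].foldl (fun d k => d.insert k 0) PySem.Dict.empty)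
      = PySem.Dict.mk [("d", (0:Int)), ("dfp", 0), ("nd", 0), ("wd", 0)] := rfl
  simp only [analyze_detections_alt]
  rw [hinit, loop_invariant target arrays 0 0 0 0, hits_eq target arrays 0]
  simp
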